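-- pv_equiv track=rewrite | github.com/nwaizugbechukwuebuka/PhishGuard | src/api/utils/ai_explainability.py | _classify_social_engineering
-- ===== SOURCE A (Python) =====
-- def _classify_social_engineering(indicator: str) -> str:
--     """Classify the type of social engineering technique."""
--     if any(word in indicator for word in ['trust', 'help', 'personal']):
--         return "trust_building"
--     elif any(word in indicator for word in ['selected', 'winner', 'exclusive']):
--         return "false_exclusivity"
--     elif any(word in indicator for word in ['confidential', 'don\'t tell']):
--         return "secrecy_manipulation"
--     else:
--         return "generic_manipulation"
-- ===== SOURCE B (Python) =====
-- _KEYWORD_RANK = {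
--     'trust': 0, 'help': 0, 'personal': 0,
--     'selected': 1, 'winner': 1, 'exclusive': 1,
--     'confidential': 2, "don't tell": 2,
-- }
-- _LABELS = ['trust_building', 'false_exclusivity',
--            'secrecy_manipulation', 'generic_manipulation']
--
-- def _classify_social_engineering(indicator: str) -> str:
--     """Classify the type of social engineering technique."""
--     best = 3
--     for word, rank in _KEYWORD_RANK.items():
--         if rank < best and word in indicator:
--             best = rank
--     return _LABELS[best]
-- ===== Notes on version B (the rewrite author's own statement) =====
-- stated objective: alternative
-- what changed: Replaces the prioritized if/elif group cascade with a single min-fold: all keywords live in one flat keyword-to-rank map, one pass computes the minimum rank among matched keywords, and the label is looked up by that rank in an array.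
import Mathlib
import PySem

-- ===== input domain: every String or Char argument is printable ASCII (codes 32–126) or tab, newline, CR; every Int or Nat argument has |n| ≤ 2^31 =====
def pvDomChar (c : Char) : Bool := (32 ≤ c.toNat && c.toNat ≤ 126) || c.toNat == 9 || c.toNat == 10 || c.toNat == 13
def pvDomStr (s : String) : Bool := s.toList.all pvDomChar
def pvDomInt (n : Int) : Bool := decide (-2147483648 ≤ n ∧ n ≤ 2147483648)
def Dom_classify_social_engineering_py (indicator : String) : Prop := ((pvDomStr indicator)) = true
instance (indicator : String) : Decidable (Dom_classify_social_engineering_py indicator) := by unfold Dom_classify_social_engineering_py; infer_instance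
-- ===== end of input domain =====

-- B replaces the prioritized if/elif cascade by a single min-fold over a flat keyword→rank map, indexing a label array by the minimum matched rank (alternative decomposition; same cost).

-- ===== PORT A =====
def classify_social_engineering_py (indicator : String) : String :=
  if (["trust", "help", "personal"]).any (fun word => PySem.Str.isIn word indicator) then
    "trust_building"
  else if (["selected", "winner", "exclusive"]).any (fun word => PySem.Str.isIn word indicator) then
    "false_exclusivity"
  else if (["confidential", "don't tell"]).any (fun word => PySem.Str.isIn word indicator) then
    "secrecy_manipulation"
  else
    "generic_manipulation"

-- ===== PORT B =====
-- the flat keyword→rank dict, in Python's insertion order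
def pvKeywordRank : List (String × Nat) :=
  [("trust", 0), ("help", 0), ("personal", 0),
   ("selected", 1), ("winner", 1), ("exclusive", 1),
   ("confidential", 2), ("don't tell", 2)]

def pvLabels : List String :=
  ["trust_building", "false_exclusivity", "secrecy_manipulation", "generic_manipulation"]

def classify_social_engineering_py_alt (indicator : String) : String :=
  let best := pvKeywordRank.foldl
    (fun best wr => if wr.2 < best && PySem.Str.isIn wr.1 indicator then wr.2 else best) 3
  pvLabels.getD best "generic_manipulation"  -- index always in range 0..3, so getD is exact for _LABELS[best]

-- ===== PRECONDITION & SPEC =====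
def Spec_classify_social_engineering_py (indicator : String) (out : String) : Prop := out = classify_social_engineering_py_alt indicator
instance (indicator : String) (out : String) : Decidable (Spec_classify_social_engineering_py indicator out) := by unfold Spec_classify_social_engineering_py; infer_instance

-- ===== CLAIM =====
def Claim_equal_classify_social_engineering_py : Prop := ∀ (indicator : String), Dom_classify_social_engineering_py indicator → Spec_classify_social_engineering_py indicator (classify_social_engineering_py indicator)

-- ===== LEMMAS AND PROOFS =====
-- truth table of the whole equation over the 8 membership booleans
theorem pvAux (b1 b2 b3 b4 b5 b6 b7 b8 : Bool) :
    (if (b1 || (b2 || b3)) = true then "trust_building"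
     else if (b4 || (b5 || b6)) = true then "false_exclusivity"
     else if (b7 || b8) = true then "secrecy_manipulation"
     else "generic_manipulation")
    = pvLabels.getD
        (List.foldl (fun best br => if br.2 < best && br.1 then br.2 else best) 3
          [(b1, 0), (b2, 0), (b3, 0), (b4, 1), (b5, 1), (b6, 1), (b7, 2), (b8, 2)])
        "generic_manipulation" := by
  cases b1 <;> cases b2 <;> cases b3 <;> cases b4 <;> cases b5 <;> cases b6 <;> cases b7 <;> cases b8 <;> decide

-- ===== VERDICT =====
theorem classify_social_engineering_py_spec : Claim_equal_classify_social_engineering_py := by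
  intro indicator _
  unfold Spec_classify_social_engineering_py classify_social_engineering_py
    classify_social_engineering_py_alt
  simp only [List.any_cons, List.any_nil, Bool.or_false]
  have hfold :
      (List.foldl (fun best wr => if wr.2 < best && PySem.Str.isIn wr.1 indicator then wr.2 else best) 3 pvKeywordRank)
      = (List.foldl (fun best br => if br.2 < best && br.1 then br.2 else best) 3
          [(PySem.Str.isIn "trust" indicator, 0), (PySem.Str.isIn "help" indicator, 0),
           (PySem.Str.isIn "personal" indicator, 0), (PySem.Str.isIn "selected" indicator, 1),
           (PySem.Str.isIn "winner" indicator, 1), (PySem.Str.isIn "exclusive" indicator, 1),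
           (PySem.Str.isIn "confidential" indicator, 2), (PySem.Str.isIn "don't tell" indicator, 2)]) := by
    rw [show [(PySem.Str.isIn "trust" indicator, (0:Nat)), (PySem.Str.isIn "help" indicator, 0),
           (PySem.Str.isIn "personal" indicator, 0), (PySem.Str.isIn "selected" indicator, 1),
           (PySem.Str.isIn "winner" indicator, 1), (PySem.Str.isIn "exclusive" indicator, 1),
           (PySem.Str.isIn "confidential" indicator, 2), (PySem.Str.isIn "don't tell" indicator, 2)]
        = pvKeywordRank.map (fun wr => (PySem.Str.isIn wr.1 indicator, wr.2)) from rfl,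
      List.foldl_map]
  rw [hfold]
  exact pvAux _ _ _ _ _ _ _ _
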